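-- pv_equiv track=rewrite | github.com/pavlinpetkov420/SoftUni_Python_Web_Developer_path | Fundamentals with Python - September 2020/Labs/08_text_processing/05.digits_letters_others.py | split_types_of_chars_v2
-- ===== SOURCE A (Python) =====
-- def split_types_of_chars_v2(text_to_split):
--     nums, \
--         chars, \
--         others = "", "", ""
--     for symbol in text_to_split:
--         if symbol.isalpha():
--             chars += symbol
--         elif symbol.isdigit():
--             nums += symbol
--         else:
--             others += symbol
--     return nums, chars, others
-- ===== SOURCE B (Python) =====
-- def split_types_of_chars_v2(text_to_split):
--     nums = ''.join(c for c in text_to_split if c.isdigit())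
--     chars = ''.join(c for c in text_to_split if c.isalpha())
--     others = ''.join(c for c in text_to_split if not c.isalpha() and not c.isdigit())
--     return nums, chars, others
-- ===== Notes on version B (the rewrite author's own statement) =====
-- stated objective: idiomatic
-- what changed: Replaces the single classifying loop with three-state accumulation by three independent filter-and-join passes, one per category.
import Mathlib
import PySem

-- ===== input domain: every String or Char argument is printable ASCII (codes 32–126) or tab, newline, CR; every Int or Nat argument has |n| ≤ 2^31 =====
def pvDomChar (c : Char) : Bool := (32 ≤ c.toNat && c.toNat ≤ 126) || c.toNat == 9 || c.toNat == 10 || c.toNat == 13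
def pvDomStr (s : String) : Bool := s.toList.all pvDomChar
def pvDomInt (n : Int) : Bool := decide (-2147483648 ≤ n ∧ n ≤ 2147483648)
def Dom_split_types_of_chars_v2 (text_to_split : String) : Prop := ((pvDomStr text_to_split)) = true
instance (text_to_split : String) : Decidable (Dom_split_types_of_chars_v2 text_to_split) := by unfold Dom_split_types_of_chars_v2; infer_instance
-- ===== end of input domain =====

-- B replaces A's single three-accumulator classifying loop with three independent filter passes (more idiomatic; same cost).

-- ===== PORT A =====
-- one pass, three string accumulators (strings modelled as their char lists, joined at return)
def split_types_of_chars_v2 (text_to_split : String) : String × String × String :=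
  let res := text_to_split.toList.foldl
    (fun (acc : List Char × List Char × List Char) symbol =>
      let (nums, chars, others) := acc
      if PySem.Chars.isalpha symbol then (nums, chars ++ [symbol], others)
      else if PySem.Chars.isdigit symbol then (nums ++ [symbol], chars, others)
      else (nums, chars, others ++ [symbol]))
    ([], [], [])
  (String.mk res.1, String.mk res.2.1, String.mk res.2.2)

-- ===== PORT B =====
-- three independent filter passes, one per category
def split_types_of_chars_v2_alt (text_to_split : String) : String × String × String :=
  (String.mk (text_to_split.toList.filter (fun c => PySem.Chars.isdigit c)),
   String.mk (text_to_split.toList.filter (fun c => PySem.Chars.isalpha c)),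
   String.mk (text_to_split.toList.filter (fun c => !PySem.Chars.isalpha c && !PySem.Chars.isdigit c)))

-- ===== PRECONDITION & SPEC =====
def Spec_split_types_of_chars_v2 (text_to_split : String) (out : String × String × String) : Prop := out = split_types_of_chars_v2_alt text_to_split
instance (text_to_split : String) (out : String × String × String) : Decidable (Spec_split_types_of_chars_v2 text_to_split out) := by unfold Spec_split_types_of_chars_v2; infer_instance

-- ===== CLAIM (what is proved, stated in full; the proofs are below) =====
def Claim_equal_split_types_of_chars_v2 : Prop := ∀ (text_to_split : String), Dom_split_types_of_chars_v2 text_to_split → Spec_split_types_of_chars_v2 text_to_split (split_types_of_chars_v2 text_to_split)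

-- ===== LEMMAS AND PROOFS =====

theorem isdigit_of_isalpha (c : Char) (h : PySem.Chars.isalpha c = true) :
    PySem.Chars.isdigit c = false := by
  unfold PySem.Chars.isalpha PySem.Chars.isdigit PySem.Chars.isupper PySem.Chars.islower at *
  simp only [Bool.or_eq_true, Bool.and_eq_true, decide_eq_true_eq, Bool.and_eq_false_iff,
    decide_eq_false_iff_not, Char.le_def, UInt32.le_iff_toNat_le] at *
  have h0 : '0'.val.toNat = 48 := rfl
  have h9 : '9'.val.toNat = 57 := rfl
  have hA : 'A'.val.toNat = 65 := rfl
  have hZ : 'Z'.val.toNat = 90 := rfl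
  have ha : 'a'.val.toNat = 97 := rfl
  have hz : 'z'.val.toNat = 122 := rfl
  omega

theorem loopA_eq_filters (l : List Char) (n c o : List Char) :
    l.foldl
      (fun (acc : List Char × List Char × List Char) symbol =>
        let (nums, chars, others) := acc
        if PySem.Chars.isalpha symbol then (nums, chars ++ [symbol], others)
        else if PySem.Chars.isdigit symbol then (nums ++ [symbol], chars, others)
        else (nums, chars, others ++ [symbol]))
      (n, c, o)
    = (n ++ l.filter (fun x => PySem.Chars.isdigit x),
       c ++ l.filter (fun x => PySem.Chars.isalpha x),
       o ++ l.filter (fun x => !PySem.Chars.isalpha x && !PySem.Chars.isdigit x)) := by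
  induction l generalizing n c o with
  | nil => simp
  | cons hd tl ih =>
    by_cases ha : PySem.Chars.isalpha hd = true
    · simp [List.foldl_cons, ha, isdigit_of_isalpha hd ha, ih]
    · by_cases hd' : PySem.Chars.isdigit hd = true
      · simp [List.foldl_cons, ha, hd', ih]
      · simp [List.foldl_cons, ha, hd', ih]

-- ===== VERDICT (by name: the statement is the Claim_ definition above) =====
theorem split_types_of_chars_v2_spec : Claim_equal_split_types_of_chars_v2 := by
  intro t _
  unfold Spec_split_types_of_chars_v2 split_types_of_chars_v2 split_types_of_chars_v2_alt
  simp [loopA_eq_filters]
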